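-- pv_equiv track=rewrite | github.com/soonhyeon/KoBART_Summary | utils.py | split_textline
-- ===== SOURCE A (Python) =====
-- def split_textline(text, delimiter='다.'):
--     ori_tls = []
--     tst = text.split(delimiter)
--     for i, l in enumerate(tst):
--
--         if i < len(tst)-1:
--             ori_tls.append(l+delimiter)
--         elif l=='':
--             pass
--         else:
--             ori_tls.append(l)
--     return ori_tls
-- ===== SOURCE B (Python) =====
-- def split_textline(text, delimiter='다.'):
--     if not delimiter:
--         raise ValueError('empty separator')
--     segments = []
--     rest = text
--     while True:
--         idx = rest.find(delimiter)
--         if idx == -1: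
--             break
--         segments.append(rest[:idx] + delimiter)
--         rest = rest[idx + len(delimiter):]
--     if rest:
--         segments.append(rest)
--     return segments
-- ===== Notes on version B (the rewrite author's own statement) =====
-- stated objective: alternative
-- what changed: B replaces split-then-reattach (text.split(delimiter) followed by an enumerate loop that re-appends the delimiter to every piece but the last) by a single find-driven cursor scan that slices each segment out of the text with the delimiter already attached, appending the final remainder only if non-empty.
import Mathlib
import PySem

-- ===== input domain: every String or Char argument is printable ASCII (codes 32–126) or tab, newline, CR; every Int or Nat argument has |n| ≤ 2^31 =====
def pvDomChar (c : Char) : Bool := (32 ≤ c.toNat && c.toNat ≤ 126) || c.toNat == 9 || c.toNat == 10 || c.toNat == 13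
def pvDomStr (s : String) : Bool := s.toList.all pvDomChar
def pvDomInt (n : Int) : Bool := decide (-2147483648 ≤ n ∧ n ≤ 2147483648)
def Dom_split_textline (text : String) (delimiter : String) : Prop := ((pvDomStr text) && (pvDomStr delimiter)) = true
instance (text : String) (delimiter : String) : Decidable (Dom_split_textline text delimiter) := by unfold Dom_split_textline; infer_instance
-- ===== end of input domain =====

-- B replaces split-then-reattach by a single find-driven cursor scan that slices each
-- delimiter-terminated segment directly out of the text (same results, similar cost).


-- ===== PORT A =====
def split_textline (text : String) (delimiter : String) : List String :=
  match PySem.Str.split? text delimiter with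
  | none => []   -- Python raises ValueError on text.split(''); excluded by Pre_
  | some tst =>
    (PySem.List.enumerate tst 0).foldl
      (fun ori_tls p =>
        if p.1 < (tst.length : Int) - 1 then ori_tls ++ [p.2 ++ delimiter]
        else if p.2 = "" then ori_tls
        else ori_tls ++ [p.2]) []

-- ===== PORT B =====
-- the while-loop of Source B: rest is the unscanned suffix; each found occurrence emits
-- rest[:idx] + delimiter and continues on rest[idx+len(delimiter):]
def bScan (d : List Char) (hd : d ≠ []) (rest : List Char) : List (List Char) :=
  let idx := PySem.Chars.find rest d
  if idx = -1 then (if rest = [] then [] else [rest])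
  else (PySem.List.slice rest none (some idx) ++ d)
       :: bScan d hd (PySem.List.slice rest (some (idx + d.length)) none)
termination_by rest.length
decreasing_by
  rename_i h
  have h0 : (0:Int) ≤ PySem.Chars.find rest d := by
    have := PySem.Chars.neg_one_le_find rest d; omega
  have hinf : d <:+: rest := (PySem.Chars.find_nonneg_iff rest d).mp h0
  have hrest : rest ≠ [] := by
    rintro rfl; exact hd (List.eq_nil_of_infix_nil hinf)
  have hdl : 1 ≤ d.length := by
    cases d with | nil => exact absurd rfl hd | cons a l => simp
  rw [PySem.List.slice_from _ (by omega)]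
  simp only [List.length_drop]
  have : rest.length ≠ 0 := by simpa using hrest
  omega

def split_textline_alt (text : String) (delimiter : String) : List String :=
  if h : delimiter.toList = [] then []   -- Source B raises ValueError here; excluded by Pre_
  else (bScan delimiter.toList h text.toList).map String.ofList

-- ===== PRECONDITION & SPEC =====
-- Pre_ excludes exactly delimiter = "", where Python's text.split('') (A) raises ValueError
-- (and B raises ValueError as well).
def Pre_split_textline (text : String) (delimiter : String) : Prop := delimiter ≠ ""
instance (text : String) (delimiter : String) : Decidable (Pre_split_textline text delimiter) := by unfold Pre_split_textline; infer_instance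
def pvWitness_split_textline : String × String := ("ab.cd.", ".")

def Spec_split_textline (text : String) (delimiter : String) (out : List String) : Prop := out = split_textline_alt text delimiter
instance (text : String) (delimiter : String) (out : List String) : Decidable (Spec_split_textline text delimiter out) := by unfold Spec_split_textline; infer_instance

-- ===== CLAIM (what is proved, stated in full; the proofs are below) =====
def Claim_equal_split_textline : Prop := ∀ (text : String) (delimiter : String), Dom_split_textline text delimiter → Pre_split_textline text delimiter → Spec_split_textline text delimiter (split_textline text delimiter)

-- ===== LEMMAS AND PROOFS =====

-- reference splitter: first-occurrence recursion, no fuel, no accumulators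
def mySplit (d : List Char) (hd : d ≠ []) : List Char → List (List Char)
  | [] => [[]]
  | c :: rest =>
    if d.isPrefixOf (c :: rest) then [] :: mySplit d hd (List.drop d.length (c :: rest))
    else (mySplit d hd rest).modifyHead (c :: ·)
termination_by l => l.length
decreasing_by
  · have hdl : 1 ≤ d.length := by
      cases d with | nil => exact absurd rfl hd | cons a l => simp
    simp only [List.length_drop, List.length_cons]; omega
  · simp

-- A's reattachment loop, as a recursion on the piece list (List Char level)
def procC (d : List Char) : List (List Char) → List (List Char)
  | [] => []
  | [l] => if l = [] then [] else [l]
  | l :: l' :: ls => (l ++ d) :: procC d (l' :: ls)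

-- same, String level
def procS (d : String) : List String → List String
  | [] => []
  | [l] => if l = "" then [] else [l]
  | l :: l' :: ls => (l ++ d) :: procS d (l' :: ls)

theorem modifyHead_id' (l : List (List Char)) :
    List.modifyHead (fun x : List Char => x) l = l := by cases l <;> rfl

theorem mySplit_cons (d : List Char) (hd : d ≠ []) (c : Char) (rest : List Char) :
    mySplit d hd (c :: rest) = if d.isPrefixOf (c :: rest) = true
      then [] :: mySplit d hd (List.drop d.length (c :: rest))
      else (mySplit d hd rest).modifyHead (c :: ·) := by
  rw [mySplit]

theorem prefix_of_isPrefixOf (d l : List Char) (h : d.isPrefixOf l = true) : d <+: l :=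
  (PySem.Chars.startswith_iff l d).mp h

theorem go_eq_mySplit (d : List Char) (hd : d ≠ []) :
    ∀ (fuel : Nat) (l cur : List Char) (acc : List (List Char)) (_ : l.length < fuel),
      PySem.Chars.splitOn.go d fuel l cur acc
        = acc.reverse ++ (mySplit d hd l).modifyHead (cur.reverse ++ ·) := by
  have hid : (fun x : List Char => List.reverse [] ++ x) = id := by funext x; simp
  intro fuel
  induction fuel with
  | zero => intro l cur acc h; exact absurd h (Nat.not_lt_zero _)
  | succ fuel ih =>
    intro l cur acc h
    cases l with
    | nil =>
      rw [PySem.Chars.splitOn.go.eq_def]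
      simp [mySplit]
    | cons c rest =>
      rw [PySem.Chars.splitOn.go.eq_def]
      have hdl : 1 ≤ d.length := by
        cases d with | nil => exact absurd rfl hd | cons a l => simp
      show (if d.isPrefixOf (c :: rest) = true then
              PySem.Chars.splitOn.go d fuel (List.drop d.length (c :: rest)) []
                (cur.reverse :: acc)
            else PySem.Chars.splitOn.go d fuel rest (c :: cur) acc) = _
      by_cases hp : d.isPrefixOf (c :: rest) = true
      · rw [if_pos hp]
        have hlen : (List.drop d.length (c :: rest)).length < fuel := by
          simp only [List.length_drop, List.length_cons] at h ⊢; omega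
        rw [ih _ _ _ hlen]
        rw [mySplit_cons, if_pos hp]
        simp only [List.reverse_cons, List.modifyHead, List.append_assoc,
          List.nil_append, List.append_nil]
        cases mySplit d hd (List.drop d.length (c :: rest)) <;> simp
      · rw [if_neg hp]
        have hlen : rest.length < fuel := by
          simp only [List.length_cons] at h; omega
        rw [ih _ _ _ hlen]
        rw [mySplit_cons, if_neg hp]
        cases hm : mySplit d hd rest with
        | nil => simp [List.modifyHead]
        | cons a t => simp [List.modifyHead]

theorem splitOn_eq_mySplit (d : List Char) (hd : d ≠ []) (l : List Char) :
    PySem.Chars.splitOn l d = mySplit d hd l := by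
  have hid : (fun x : List Char => List.reverse [] ++ x) = id := by funext x; simp
  unfold PySem.Chars.splitOn
  rw [go_eq_mySplit d hd (l.length + 1) l [] [] (by omega)]
  simp only [List.reverse_nil, List.nil_append]
  exact modifyHead_id' _

theorem mySplit_ne_nil (d : List Char) (hd : d ≠ []) (l : List Char) :
    mySplit d hd l ≠ [] := by
  fun_induction mySplit d hd l with
  | case1 => simp
  | case2 => simp
  | case3 c rest hp ih =>
    cases hm : mySplit d hd rest with
    | nil => exact absurd hm ih
    | cons a t => simp [List.modifyHead]

theorem mySplit_of_not_infix (d : List Char) (hd : d ≠ []) (l : List Char)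
    (h : ¬ d <:+: l) : mySplit d hd l = [l] := by
  fun_induction mySplit d hd l with
  | case1 => rfl
  | case2 c rest hp ih =>
    exact absurd (prefix_of_isPrefixOf d _ hp).isInfix h
  | case3 c rest hp ih =>
    rw [ih (fun hi => h (List.infix_cons hi))]
    simp [List.modifyHead]

theorem find_eq_zero_of_prefix (d l : List Char) (h : d <+: l) :
    PySem.Chars.find l d = 0 := by
  have h0 : 0 ≤ PySem.Chars.find l d := (PySem.Chars.find_nonneg_iff l d).mpr h.isInfix
  obtain ⟨hpre, hmin⟩ := PySem.Chars.find_spec h0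
  rcases Nat.eq_zero_or_pos (PySem.Chars.find l d).toNat with ht | ht
  · omega
  · exact absurd h (by simpa using hmin 0 ht)

theorem find_tail (d : List Char) (c : Char) (rest : List Char)
    (hnp : ¬ d <+: (c :: rest)) (h0 : 0 ≤ PySem.Chars.find (c :: rest) d) :
    PySem.Chars.find rest d = PySem.Chars.find (c :: rest) d - 1 := by
  obtain ⟨hpre, hmin⟩ := PySem.Chars.find_spec h0
  have hi1 : 1 ≤ (PySem.Chars.find (c :: rest) d).toNat := by
    rcases Nat.eq_zero_or_pos (PySem.Chars.find (c :: rest) d).toNat with ht | ht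
    · rw [ht] at hpre; exact absurd (by simpa using hpre) hnp
    · omega
  have hpre' : d <+: rest.drop ((PySem.Chars.find (c :: rest) d).toNat - 1) := by
    rw [← List.drop_succ_cons, Nat.sub_add_cancel hi1]; exact hpre
  have hinfr : d <:+: rest :=
    hpre'.isInfix.trans (List.drop_suffix _ rest).isInfix
  have h0r : 0 ≤ PySem.Chars.find rest d := (PySem.Chars.find_nonneg_iff rest d).mpr hinfr
  obtain ⟨hprer, hminr⟩ := PySem.Chars.find_spec h0r
  have hge : (PySem.Chars.find (c :: rest) d).toNat - 1 ≤ (PySem.Chars.find rest d).toNat := by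
    by_contra hlt
    push_neg at hlt
    exact hmin ((PySem.Chars.find rest d).toNat + 1) (by omega)
      (by rw [List.drop_succ_cons]; exact hprer)
  have hle : (PySem.Chars.find rest d).toNat ≤ (PySem.Chars.find (c :: rest) d).toNat - 1 :=
    by_contra fun hlt =>
      hminr ((PySem.Chars.find (c :: rest) d).toNat - 1) (by omega) hpre'
  omega

theorem mySplit_find (d : List Char) (hd : d ≠ []) (l : List Char)
    (h0 : 0 ≤ PySem.Chars.find l d) :
    mySplit d hd l = l.take (PySem.Chars.find l d).toNat
      :: mySplit d hd (l.drop ((PySem.Chars.find l d).toNat + d.length)) := by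
  revert h0
  fun_induction mySplit d hd l with
  | case1 =>
    intro h0
    have : d <:+: ([] : List Char) := (PySem.Chars.find_nonneg_iff _ d).mp h0
    exact absurd (List.eq_nil_of_infix_nil this) hd
  | case2 c rest hp ih =>
    intro h0
    have hz : PySem.Chars.find (c :: rest) d = 0 :=
      find_eq_zero_of_prefix d _ (prefix_of_isPrefixOf d _ hp)
    rw [hz]
    simp
  | case3 c rest hp ih =>
    intro h0
    have hnp : ¬ d <+: (c :: rest) := fun hpp => hp ((PySem.Chars.startswith_iff _ d).mpr hpp)
    have htail : PySem.Chars.find rest d = PySem.Chars.find (c :: rest) d - 1 :=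
      find_tail d c rest hnp h0
    have hi1 : 1 ≤ (PySem.Chars.find (c :: rest) d).toNat := by
      obtain ⟨hpre, _⟩ := PySem.Chars.find_spec h0
      rcases Nat.eq_zero_or_pos (PySem.Chars.find (c :: rest) d).toNat with ht | ht
      · rw [ht] at hpre; exact absurd (by simpa using hpre) hnp
      · omega
    have h0r : 0 ≤ PySem.Chars.find rest d := by omega
    rw [ih h0r]
    have htn : (PySem.Chars.find rest d).toNat = (PySem.Chars.find (c :: rest) d).toNat - 1 := by
      omega
    rw [htn]
    simp only [List.modifyHead]
    rw [List.cons_eq_cons]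
    refine ⟨?_, ?_⟩
    · rw [← List.take_succ_cons]
      congr 1
      omega
    · congr 1
      rw [show (PySem.Chars.find (c :: rest) d).toNat + d.length
            = (((PySem.Chars.find (c :: rest) d).toNat - 1) + d.length) + 1 by omega,
          List.drop_succ_cons]

theorem procC_cons_of_ne_nil (d l : List Char) (ps : List (List Char)) (h : ps ≠ []) :
    procC d (l :: ps) = (l ++ d) :: procC d ps := by
  cases ps with
  | nil => exact absurd rfl h
  | cons a t => rfl

theorem bScan_eq_procC (d : List Char) (hd : d ≠ []) (rest : List Char) :
    bScan d hd rest = procC d (mySplit d hd rest) := by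
  fun_induction bScan d hd rest
  case case1 idx hneg =>
    simp [mySplit, procC]
  case case2 r idx hneg hnil =>
    have hni : ¬ d <:+: r := (PySem.Chars.find_eq_neg_one_iff r d).mp hneg
    rw [mySplit_of_not_infix d hd r hni]
    simp [procC, hnil]
  case case3 r idx hneg ih =>
    have h0 : 0 ≤ PySem.Chars.find r d := by
      have := PySem.Chars.neg_one_le_find r d
      simp only [idx] at hneg ⊢
      omega
    rw [mySplit_find d hd r h0,
        procC_cons_of_ne_nil d _ _ (mySplit_ne_nil d hd _)]
    have htn : ((PySem.Chars.find r d) + (d.length : Int)).toNat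
        = (PySem.Chars.find r d).toNat + d.length := by omega
    simp only [idx] at ih ⊢
    rw [PySem.List.slice_to r (by omega)]
    rw [PySem.List.slice_from r (by omega)] at ih ⊢
    rw [htn] at ih ⊢
    rw [ih]

theorem foldA (d : String) (n : Nat) :
    ∀ (rest : List String) (s : Int) (acc : List String), s + rest.length = n →
      (PySem.List.enumerate rest s).foldl
        (fun ori_tls p =>
          if p.1 < (n : Int) - 1 then ori_tls ++ [p.2 ++ d]
          else if p.2 = "" then ori_tls
          else ori_tls ++ [p.2]) acc = acc ++ procS d rest := by
  intro rest
  induction rest with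
  | nil => intro s acc h; simp [PySem.List.enumerate_nil, procS]
  | cons l ls ih =>
    intro s acc h
    rw [PySem.List.enumerate_cons]
    simp only [List.foldl_cons]
    cases ls with
    | nil =>
      simp only [List.length_cons, List.length_nil] at h
      rw [if_neg (by push_cast at h ⊢; omega)]
      simp only [PySem.List.enumerate_nil, List.foldl_nil, procS]
      split_ifs <;> simp
    | cons x xs =>
      simp only [List.length_cons, Nat.cast_add, Nat.cast_ofNat, Nat.cast_one] at h
      rw [if_pos (by push_cast at h ⊢; omega : (s : Int) < (n : Int) - 1)]
      rw [ih (s + 1) (acc ++ [l ++ d])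
        (by simp only [List.length_cons] at h ⊢; push_cast at h ⊢; omega)]
      simp [procS]

theorem procS_map (d : String) (ps : List (List Char)) :
    procS d (ps.map String.ofList) = (procC d.toList ps).map String.ofList := by
  induction ps with
  | nil => rfl
  | cons l ps ih =>
    cases ps with
    | nil =>
      have hiff : (String.ofList l = "") ↔ l = [] := by
        constructor
        · intro hh
          have := congrArg String.toList hh
          simpa using this
        · intro hh; subst hh; rfl
      simp only [List.map_cons, List.map_nil, procS, procC]
      split_ifs with h1 h2 h2
      · rfl
      · exact absurd (hiff.mp h1) h2
      · exact absurd (hiff.mpr h2) h1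
      · rfl
    | cons a t =>
      have happ : String.ofList l ++ d = String.ofList (l ++ d.toList) := by
        rw [← String.toList_inj]
        simp
      simp only [List.map_cons, procS, procC, List.map_cons] at ih ⊢
      rw [happ, ih]

-- ===== VERDICT (by name: the statement is the Claim_ definition above) =====
theorem split_textline_spec : Claim_equal_split_textline := by
  intro text delimiter _hdom hpre
  unfold Spec_split_textline split_textline split_textline_alt
  have hdl : delimiter.toList ≠ [] := fun hh =>
    hpre (String.toList_eq_nil_iff.mp hh)
  rw [dif_neg hdl]
  have hsplit : PySem.Str.split? text delimiter
      = some ((PySem.Chars.splitOn text.toList delimiter.toList).map String.ofList) := by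
    simp [PySem.Str.split?, PySem.Chars.split?, hdl]
  simp only [hsplit]
  rw [foldA delimiter ((PySem.Chars.splitOn text.toList delimiter.toList).map String.ofList).length
      _ 0 [] (by simp)]
  rw [List.nil_append, splitOn_eq_mySplit delimiter.toList hdl, procS_map,
      ← bScan_eq_procC delimiter.toList hdl]
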